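-- pv_equiv track=rewrite | github.com/eyalrozenman/extract_trump_approval | extract_cudry.py | compute_fieldnames
-- ===== SOURCE A (Python) =====
-- def compute_fieldnames(orig_fields):
--     fields = list(orig_fields)
--     # Remove unwanted columns
--     for col in ("Disapprove", "Net"):
--         if col in fields:
--             fields.remove(col)
--     # Insert Sponsor immediately after Pollster
--     if "Pollster" in fields and "Sponsor" not in fields:
--         i = fields.index("Pollster")
--         fields.insert(i + 1, "Sponsor")
--     elif "Sponsor" not in fields:
--         # Fallback: append at end if Pollster not found
--         fields.append("Sponsor")
--     # Insert RollingWeightedApprove immediately after Approve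
--     if "Approve" in fields and "RollingWeightedApprove" not in fields:
--         i = fields.index("Approve")
--         fields.insert(i + 1, "RollingWeightedApprove")
--     elif "RollingWeightedApprove" not in fields:
--         fields.append("RollingWeightedApprove")
--     return fields
-- ===== SOURCE B (Python) =====
-- def compute_fieldnames(orig_fields):
--     # One pass: drop the first "Disapprove"/"Net", emit "Sponsor" after the first
--     # "Pollster" and "RollingWeightedApprove" after the first "Approve" when missing,
--     # fall back to appending Sponsor then RollingWeightedApprove at the end.
--     sponsor_done = "Sponsor" in orig_fields
--     rwa_done = "RollingWeightedApprove" in orig_fields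
--     dropped_dis = False
--     dropped_net = False
--     result = []
--     for col in orig_fields:
--         if col == "Disapprove" and not dropped_dis:
--             dropped_dis = True
--             continue
--         if col == "Net" and not dropped_net:
--             dropped_net = True
--             continue
--         result.append(col)
--         if col == "Pollster" and not sponsor_done:
--             result.append("Sponsor")
--             sponsor_done = True
--         elif col == "Approve" and not rwa_done:
--             result.append("RollingWeightedApprove")
--             rwa_done = True
--     if not sponsor_done:
--         result.append("Sponsor")
--     if not rwa_done:
--         result.append("RollingWeightedApprove")
--     return result
-- ===== Notes on version B (the rewrite author's own statement) =====
-- stated objective: simpler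
-- what changed: Replaces A's four in-place list passes (two remove() scans plus two membership/index()/insert() passes) with a single left-to-right pass that drops the first 'Disapprove'/'Net' and emits 'Sponsor'/'RollingWeightedApprove' right after the first 'Pollster'/'Approve' (or appends them at the end), tracking everything with boolean flags.
import Mathlib
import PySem

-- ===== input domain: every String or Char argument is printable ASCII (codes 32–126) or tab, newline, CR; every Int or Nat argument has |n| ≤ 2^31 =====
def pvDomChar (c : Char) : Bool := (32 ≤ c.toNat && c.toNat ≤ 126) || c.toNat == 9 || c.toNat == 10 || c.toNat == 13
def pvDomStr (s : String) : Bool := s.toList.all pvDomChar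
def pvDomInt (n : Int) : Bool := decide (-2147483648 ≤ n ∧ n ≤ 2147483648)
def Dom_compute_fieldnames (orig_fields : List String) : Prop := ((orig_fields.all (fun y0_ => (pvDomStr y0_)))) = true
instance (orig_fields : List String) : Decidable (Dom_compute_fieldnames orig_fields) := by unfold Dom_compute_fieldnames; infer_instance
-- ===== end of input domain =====

-- B rebuilds the list in ONE pass with drop/placed flags instead of A's
-- remove/index/insert passes over the list; objective: simpler (no speed claim).

-- ===== PORT A =====
def compute_fieldnames (orig_fields : List String) : List String :=
  let fields := orig_fields
  -- for col in ("Disapprove", "Net"): if col in fields: fields.remove(col)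
  let fields := if fields.contains "Disapprove" then (PySem.List.remove? fields "Disapprove").getD fields else fields
  let fields := if fields.contains "Net" then (PySem.List.remove? fields "Net").getD fields else fields
  -- insert Sponsor immediately after Pollster, else append
  let fields :=
    if fields.contains "Pollster" && !fields.contains "Sponsor" then
      let i := (PySem.List.index? fields "Pollster").getD 0
      PySem.List.insert fields ((i : Int) + 1) "Sponsor"
    else if !fields.contains "Sponsor" then fields ++ ["Sponsor"]
    else fields
  -- insert RollingWeightedApprove immediately after Approve, else append
  let fields :=
    if fields.contains "Approve" && !fields.contains "RollingWeightedApprove" then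
      let i := (PySem.List.index? fields "Approve").getD 0
      PySem.List.insert fields ((i : Int) + 1) "RollingWeightedApprove"
    else if !fields.contains "RollingWeightedApprove" then fields ++ ["RollingWeightedApprove"]
    else fields
  fields

-- ===== PORT B =====
-- the single loop of Source B: flags (dropped_dis, dropped_net, sponsor_done, rwa_done)
def cfAltGo : List String → Bool → Bool → Bool → Bool → List String
  | [], _, _, sp, rp =>
      (if sp = false then ["Sponsor"] else []) ++
      (if rp = false then ["RollingWeightedApprove"] else [])
  | c :: rest, dd, dn, sp, rp =>
      if c = "Disapprove" ∧ dd = false then cfAltGo rest true dn sp rp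
      else if c = "Net" ∧ dn = false then cfAltGo rest dd true sp rp
      else if c = "Pollster" ∧ sp = false then c :: "Sponsor" :: cfAltGo rest dd dn true rp
      else if c = "Approve" ∧ rp = false then c :: "RollingWeightedApprove" :: cfAltGo rest dd dn sp true
      else c :: cfAltGo rest dd dn sp rp

def compute_fieldnames_alt (orig_fields : List String) : List String :=
  cfAltGo orig_fields false false
    (orig_fields.contains "Sponsor") (orig_fields.contains "RollingWeightedApprove")

-- ===== PRECONDITION & SPEC =====
def Spec_compute_fieldnames (orig_fields : List String) (out : List String) : Prop := out = compute_fieldnames_alt orig_fields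
instance (orig_fields : List String) (out : List String) : Decidable (Spec_compute_fieldnames orig_fields out) := by unfold Spec_compute_fieldnames; infer_instance

-- ===== CLAIM (what is proved, stated in full; the proofs are below) =====
def Claim_equal_compute_fieldnames : Prop := ∀ (orig_fields : List String), Dom_compute_fieldnames orig_fields → Spec_compute_fieldnames orig_fields (compute_fieldnames orig_fields)

-- ===== LEMMAS AND PROOFS =====

-- remove first occurrence of x
def rfirst (x : String) : List String → List String
  | [] => []
  | c :: r => if c = x then r else c :: rfirst x r

-- insert s after first occurrence of p, or append s if p absent
def iaoa (p s : String) : List String → List String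
  | [] => [s]
  | c :: r => if c = p then c :: s :: r else c :: iaoa p s r

-- the removal part of B's loop alone
def rmGo : List String → Bool → Bool → List String
  | [], _, _ => []
  | c :: rest, dd, dn =>
      if c = "Disapprove" ∧ dd = false then rmGo rest true dn
      else if c = "Net" ∧ dn = false then rmGo rest dd true
      else c :: rmGo rest dd dn

-- the insertion part of B's loop alone
def insGo : List String → Bool → Bool → List String
  | [], sp, rp =>
      (if sp = false then ["Sponsor"] else []) ++
      (if rp = false then ["RollingWeightedApprove"] else [])
  | c :: rest, sp, rp =>
      if c = "Pollster" ∧ sp = false then c :: "Sponsor" :: insGo rest true rp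
      else if c = "Approve" ∧ rp = false then c :: "RollingWeightedApprove" :: insGo rest sp true
      else c :: insGo rest sp rp

theorem remove_eq_rfirst (x : String) (l : List String) :
    (if l.contains x then (PySem.List.remove? l x).getD l else l) = rfirst x l := by
  induction l with
  | nil => simp [rfirst]
  | cons c r ih =>
    by_cases h : c = x
    · subst h; simp [rfirst]
    · have hcc : ((c :: r).contains x) = r.contains x := by
        simp only [List.contains_cons]
        simp [beq_eq_false_iff_ne.mpr (fun hh : x = c => h hh.symm)]
      rw [hcc, PySem.List.remove?_cons_of_ne r h]
      by_cases hm : r.contains x = true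
      · obtain ⟨t, ht⟩ : ∃ t, PySem.List.remove? r x = some t := by
          rcases Option.eq_none_or_eq_some (PySem.List.remove? r x) with h0 | h0
          · exact absurd ((PySem.List.remove?_eq_none_iff r x).mp h0)
              (by simpa using List.contains_iff_mem.mp hm)
          · exact h0
        have ih' := ih
        rw [if_pos hm, ht] at ih'
        rw [if_pos hm, ht]
        simp only [Option.map_some, Option.getD_some] at *
        simp only [rfirst, if_neg h]
        rw [ih']
      · have hr : PySem.List.remove? r x = none :=
          (PySem.List.remove?_eq_none_iff r x).mpr
            (fun hx => hm (List.contains_iff_mem.mpr hx))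
        have ih' := ih
        rw [if_neg hm] at ih'
        rw [if_neg hm]
        simp only [rfirst, if_neg h]
        rw [← ih']

theorem mem_rfirst_of_ne (x y : String) (hxy : x ≠ y) (l : List String) :
    x ∈ rfirst y l ↔ x ∈ l := by
  induction l with
  | nil => simp [rfirst]
  | cons c r ih =>
    by_cases h : c = y
    · subst h
      simp [rfirst, hxy]
    · simp [rfirst, if_neg h, ih]

theorem mem_iaoa_of_ne (x p s : String) (hxs : x ≠ s) (l : List String) :
    x ∈ iaoa p s l ↔ x ∈ l := by
  induction l with
  | nil => simp [iaoa, hxs]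
  | cons c r ih =>
    by_cases h : c = p
    · subst h
      simp [iaoa, hxs]
    · simp [iaoa, if_neg h, ih]

theorem iaoa_of_not_mem (p s : String) (l : List String) (h : p ∉ l) :
    iaoa p s l = l ++ [s] := by
  induction l with
  | nil => simp [iaoa]
  | cons c r ih =>
    simp only [List.mem_cons, not_or] at h
    simp only [iaoa]
    rw [if_neg (fun hh : c = p => h.1 hh.symm), ih h.2]
    simp

theorem insert_index_eq_iaoa (p s : String) (l : List String) (h : p ∈ l) :
    PySem.List.insert l (((PySem.List.index? l p).getD 0 : Int) + 1) s = iaoa p s l := by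
  induction l with
  | nil => simp at h
  | cons c r ih =>
    by_cases hc : c = p
    · subst hc
      rw [PySem.List.index?_cons_self]
      simp only [Option.getD_some, Nat.cast_zero, zero_add]
      rw [show (1 : Int) = ((1 : Nat) : Int) by norm_num,
          PySem.List.insert_natCast _ 1 s (by simp)]
      simp [iaoa]
    · have hr : p ∈ r := by
        rcases List.mem_cons.mp h with h0 | h0
        · exact absurd h0.symm hc
        · exact h0
      obtain ⟨k, hk⟩ : ∃ k, PySem.List.index? r p = some k := by
        rcases Option.eq_none_or_eq_some (PySem.List.index? r p) with h0 | h0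
        · exact absurd ((PySem.List.index?_eq_none_iff r p).mp h0) (not_not_intro hr)
        · exact h0
      have hklt : k < r.length := (PySem.List.getElem_of_index?_eq_some hk).1
      rw [PySem.List.index?_cons_of_ne r hc, hk]
      simp only [Option.map_some, Option.getD_some]
      rw [show ((k + 1 : Nat) : Int) + 1 = ((k + 2 : Nat) : Int) by push_cast; ring,
          PySem.List.insert_natCast _ (k + 2) s (by simp; omega)]
      rw [hk] at ih
      simp only [Option.getD_some] at ih
      rw [show ((k : Nat) : Int) + 1 = ((k + 1 : Nat) : Int) by push_cast; ring,
          PySem.List.insert_natCast _ (k + 1) s (by simp; omega)] at ih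
      simp only [List.take_succ_cons, List.drop_succ_cons, List.cons_append]
      rw [ih hr]
      simp [iaoa, if_neg hc]

-- A's insertion stage, expressed via iaoa
theorem stage_eq (p s : String) (l : List String) :
    (if l.contains p && !l.contains s then
       PySem.List.insert l (((PySem.List.index? l p).getD 0 : Int) + 1) s
     else if !l.contains s then l ++ [s] else l)
    = (if l.contains s then l else iaoa p s l) := by
  by_cases hs : s ∈ l
  · have h1 : l.contains s = true := List.contains_iff_mem.mpr hs
    rw [if_neg (show ¬ (l.contains p && !l.contains s) = true by simp [hs])]
    rw [if_neg (show ¬ (!l.contains s) = true by simp [hs])]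
    rw [if_pos h1]
  · have h1 : l.contains s = false := by
      rw [Bool.eq_false_iff]
      exact fun hh => hs (List.contains_iff_mem.mp hh)
    by_cases hp : p ∈ l
    · have h2 : l.contains p = true := List.contains_iff_mem.mpr hp
      rw [if_pos (show (l.contains p && !l.contains s) = true by simp [hp, hs])]
      rw [if_neg (show ¬ l.contains s = true by simp [hs])]
      exact insert_index_eq_iaoa p s l hp
    · have h2 : l.contains p = false := by
        rw [Bool.eq_false_iff]
        exact fun hh => hp (List.contains_iff_mem.mp hh)
      rw [if_neg (show ¬ (l.contains p && !l.contains s) = true by simp [hp])]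
      rw [if_pos (show (!l.contains s) = true by simp [hs])]
      rw [if_neg (show ¬ l.contains s = true by simp [hs])]
      exact (iaoa_of_not_mem p s l hp).symm

-- B's loop splits into a removal pass followed by an insertion pass
theorem cfAltGo_split (l : List String) (dd dn sp rp : Bool) :
    cfAltGo l dd dn sp rp = insGo (rmGo l dd dn) sp rp := by
  induction l generalizing dd dn sp rp with
  | nil => simp [cfAltGo, rmGo, insGo]
  | cons c r ih =>
    simp only [cfAltGo, rmGo]
    by_cases h1 : c = "Disapprove" ∧ dd = false
    · simp [h1, ih]
    · by_cases h2 : c = "Net" ∧ dn = false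
      · simp [h2, ih]
      · simp only [if_neg h1, if_neg h2, insGo]
        by_cases h3 : c = "Pollster" ∧ sp = false
        · simp [h3, ih]
        · by_cases h4 : c = "Approve" ∧ rp = false
          · simp [h4, ih]
          · simp [h3, h4, ih]

-- the removal pass is the two first-occurrence removals
theorem rmGo_eq (l : List String) (dd dn : Bool) :
    rmGo l dd dn =
      (if dn then (if dd then l else rfirst "Disapprove" l)
       else rfirst "Net" (if dd then l else rfirst "Disapprove" l)) := by
  induction l generalizing dd dn with
  | nil => cases dd <;> cases dn <;> simp [rmGo, rfirst]
  | cons c r ih =>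
    by_cases h1 : c = "Disapprove"
    · subst h1
      cases dd <;> cases dn <;>
        simp [rmGo, rfirst, ih]
    · by_cases h2 : c = "Net"
      · subst h2
        cases dd <;> cases dn <;>
          simp [rmGo, rfirst, h1, ih]
      · cases dd <;> cases dn <;>
          simp [rmGo, rfirst, h1, h2, ih]

-- the insertion pass is the two iaoa stages
theorem insGo_eq (l : List String) (sp rp : Bool) :
    insGo l sp rp =
      (if rp then (if sp then l else iaoa "Pollster" "Sponsor" l)
       else iaoa "Approve" "RollingWeightedApprove"
              (if sp then l else iaoa "Pollster" "Sponsor" l)) := by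
  induction l generalizing sp rp with
  | nil => cases sp <;> cases rp <;> simp [insGo, iaoa]
  | cons c r ih =>
    by_cases h1 : c = "Pollster"
    · subst h1
      cases sp <;> cases rp <;>
        simp [insGo, iaoa, ih]
    · by_cases h2 : c = "Approve"
      · subst h2
        cases sp <;> cases rp <;>
          simp [insGo, iaoa, h1, ih]
      · cases sp <;> cases rp <;>
          simp [insGo, iaoa, h1, h2, ih]

-- ===== VERDICT (by name: the statement is the Claim_ definition above) =====
theorem compute_fieldnames_spec : Claim_equal_compute_fieldnames := by
  intro l _
  show compute_fieldnames l = compute_fieldnames_alt l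
  unfold compute_fieldnames compute_fieldnames_alt
  dsimp only
  rw [remove_eq_rfirst, remove_eq_rfirst]
  set m : List String := rfirst "Net" (rfirst "Disapprove" l) with hm
  rw [stage_eq "Pollster" "Sponsor" m]
  have hS : m.contains "Sponsor" = l.contains "Sponsor" := by
    simp [hm, mem_rfirst_of_ne "Sponsor" "Net" (by decide),
          mem_rfirst_of_ne "Sponsor" "Disapprove" (by decide)]
  have hR : m.contains "RollingWeightedApprove" = l.contains "RollingWeightedApprove" := by
    simp [hm, mem_rfirst_of_ne "RollingWeightedApprove" "Net" (by decide),
          mem_rfirst_of_ne "RollingWeightedApprove" "Disapprove" (by decide)]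
  set m2 : List String := (if m.contains "Sponsor" then m else iaoa "Pollster" "Sponsor" m) with hm2
  rw [stage_eq "Approve" "RollingWeightedApprove" m2]
  have hR2 : m2.contains "RollingWeightedApprove" = l.contains "RollingWeightedApprove" := by
    rw [hm2]
    by_cases h : m.contains "Sponsor" = true
    · rw [if_pos h]; exact hR
    · rw [if_neg h, ← hR]
      simp [mem_iaoa_of_ne "RollingWeightedApprove" "Pollster" "Sponsor" (by decide)]
  rw [cfAltGo_split, rmGo_eq, insGo_eq]
  simp only [if_false, Bool.false_eq_true, ← hm]
  rw [hR2, hm2, hS]
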